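-- pv_equiv track=rewrite | github.com/aivo-ai/aivo-virtual-brain | services/search-svc/pipeline/transform.py | _calculate_sensitivity_level
-- ===== SOURCE A (Python) =====
-- from typing import Dict, List, Optional, Any, Set
--
-- def _calculate_sensitivity_level(document: Dict[str, Any]) -> str:
--     """Calculate data sensitivity level for the document."""
--     sensitive_fields = {
--         "high": ["ssn", "credit_card", "salary", "medical_info"],
--         "medium": ["email", "phone", "address", "birth_date"],
--         "low": ["name", "grade", "subject"]
--     }
--
--     for level, fields in sensitive_fields.items():
--         for field in fields:
--             if field in document:
--                 return level
--
--     return "public"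
-- ===== SOURCE B (Python) =====
-- def _calculate_sensitivity_level(document):
--     """Calculate data sensitivity level for the document."""
--     rank = {
--         "ssn": 0, "credit_card": 0, "salary": 0, "medical_info": 0,
--         "email": 1, "phone": 1, "address": 1, "birth_date": 1,
--         "name": 2, "grade": 2, "subject": 2,
--     }
--     best = 3
--     for key in document:
--         best = min(best, rank.get(key, 3))
--     if best == 0:
--         return "high"
--     if best == 1:
--         return "medium"
--     if best == 2:
--         return "low"
--     return "public"
-- ===== Notes on version B (the rewrite author's own statement) =====
-- stated objective: alternative
-- what changed: Instead of scanning the fixed field catalogue level by level and returning on the first field found in the document, B builds a flat field->priority-rank dict and makes a single pass over the document's keys keeping the minimum rank, mapping the final best rank back to a level.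
import Mathlib
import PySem

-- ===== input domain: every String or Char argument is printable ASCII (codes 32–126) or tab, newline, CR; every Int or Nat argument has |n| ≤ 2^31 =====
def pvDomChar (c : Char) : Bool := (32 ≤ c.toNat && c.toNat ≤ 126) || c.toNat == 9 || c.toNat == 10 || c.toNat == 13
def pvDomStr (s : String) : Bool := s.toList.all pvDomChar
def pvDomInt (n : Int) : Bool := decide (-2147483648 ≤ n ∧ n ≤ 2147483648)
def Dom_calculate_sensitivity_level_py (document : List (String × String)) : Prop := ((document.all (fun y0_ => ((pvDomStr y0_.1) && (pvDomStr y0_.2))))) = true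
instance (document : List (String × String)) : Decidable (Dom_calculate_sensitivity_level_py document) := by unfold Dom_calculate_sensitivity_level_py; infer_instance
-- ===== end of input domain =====

-- B replaces A's catalogue scan with a flat field->rank dict and one min-rank pass over the document's keys (alternative decomposition).


-- ===== PORT A =====
-- 'field in document' for a Python dict: membership among the keys
def pvMemDoc (document : List (String × String)) (field : String) : Bool :=
  document.any (fun kv => kv.1 == field)

def pvSensitiveFields : List (String × List String) :=
  [("high", ["ssn", "credit_card", "salary", "medical_info"]),
   ("medium", ["email", "phone", "address", "birth_date"]),
   ("low", ["name", "grade", "subject"])]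

-- the two nested for-loops with early return: first level whose field list hits the document
def pvLoopA : List (String × List String) → List (String × String) → String
  | [], _ => "public"
  | (level, fields) :: rest, doc =>
      if fields.any (pvMemDoc doc) then level else pvLoopA rest doc

def calculate_sensitivity_level_py (document : List (String × String)) : String :=
  pvLoopA pvSensitiveFields document

-- ===== PORT B =====
def pvRankDict : PySem.Dict String Int :=
  PySem.Dict.ofList
    [("ssn", 0), ("credit_card", 0), ("salary", 0), ("medical_info", 0),
     ("email", 1), ("phone", 1), ("address", 1), ("birth_date", 1),
     ("name", 2), ("grade", 2), ("subject", 2)]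

def calculate_sensitivity_level_py_alt (document : List (String × String)) : String :=
  let best := document.foldl (fun best kv => min best (PySem.Dict.getD pvRankDict kv.1 3)) 3
  if best = 0 then "high"
  else if best = 1 then "medium"
  else if best = 2 then "low"
  else "public"

-- ===== PRECONDITION & SPEC =====
def Spec_calculate_sensitivity_level_py (document : List (String × String)) (out : String) : Prop := out = calculate_sensitivity_level_py_alt document
instance (document : List (String × String)) (out : String) : Decidable (Spec_calculate_sensitivity_level_py document out) := by unfold Spec_calculate_sensitivity_level_py; infer_instance

-- ===== CLAIM (what is proved, stated in full; the proofs are below) =====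
def Claim_equal_calculate_sensitivity_level_py : Prop := ∀ (document : List (String × String)), Dom_calculate_sensitivity_level_py document → Spec_calculate_sensitivity_level_py document (calculate_sensitivity_level_py document)

-- ===== LEMMAS AND PROOFS =====
def pvHw : List String := ["ssn", "credit_card", "salary", "medical_info"]
def pvMw : List String := ["email", "phone", "address", "birth_date"]
def pvLw : List String := ["name", "grade", "subject"]

def pvRankClosed (k : String) : Int :=
  if k ∈ pvHw then 0 else if k ∈ pvMw then 1 else if k ∈ pvLw then 2 else 3

lemma pv_rank_eq (k : String) : PySem.Dict.getD pvRankDict k 3 = pvRankClosed k := by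
  unfold pvRankClosed pvHw pvMw pvLw
  split_ifs with h1 h2 h3
  · simp only [List.mem_cons, List.not_mem_nil, or_false] at h1
    rcases h1 with h|h|h|h <;> subst h <;> decide
  · simp only [List.mem_cons, List.not_mem_nil, or_false] at h2
    rcases h2 with h|h|h|h <;> subst h <;> decide
  · simp only [List.mem_cons, List.not_mem_nil, or_false] at h3
    rcases h3 with h|h|h <;> subst h <;> decide
  · simp only [List.mem_cons, List.not_mem_nil, or_false, not_or] at h1 h2 h3
    obtain ⟨a1, a2, a3, a4⟩ := h1; obtain ⟨b1, b2, b3, b4⟩ := h2; obtain ⟨c1, c2, c3⟩ := h3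
    simp only [pvRankDict, PySem.Dict.ofList, PySem.Dict.update, List.foldl]
    rw [PySem.Dict.getD_insert, PySem.Dict.getD_insert, PySem.Dict.getD_insert,
        PySem.Dict.getD_insert, PySem.Dict.getD_insert, PySem.Dict.getD_insert,
        PySem.Dict.getD_insert, PySem.Dict.getD_insert, PySem.Dict.getD_insert,
        PySem.Dict.getD_insert, PySem.Dict.getD_insert]
    simp [a1, a2, a3, a4, b1, b2, b3, b4, c1, c2, c3, PySem.Dict.getD_empty]

def pvCform (doc : List (String × String)) : Int :=
  if doc.any (fun kv => decide (kv.1 ∈ pvHw)) then 0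
  else if doc.any (fun kv => decide (kv.1 ∈ pvMw)) then 1
  else if doc.any (fun kv => decide (kv.1 ∈ pvLw)) then 2
  else 3

lemma pv_cform_cons (kv : String × String) (doc : List (String × String)) :
    pvCform (kv :: doc) = min (pvRankClosed kv.1) (pvCform doc) := by
  simp only [pvCform, pvRankClosed, List.any_cons, Bool.or_eq_true, decide_eq_true_eq]
  by_cases h1 : kv.1 ∈ pvHw <;> by_cases h2 : kv.1 ∈ pvMw <;> by_cases h3 : kv.1 ∈ pvLw <;>
    simp only [h1, h2, h3, true_or, false_or, if_true, if_false] <;>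
    split_ifs <;> omega

lemma pv_fold_eq (doc : List (String × String)) :
    ∀ init : Int, init ≤ 3 →
      doc.foldl (fun b kv => min b (pvRankClosed kv.1)) init = min init (pvCform doc) := by
  induction doc with
  | nil => intro init h; simp [pvCform]; omega
  | cons kv doc ih =>
    intro init h
    have hr : pvRankClosed kv.1 ≤ 3 := by unfold pvRankClosed; split_ifs <;> omega
    rw [List.foldl_cons, ih (min init (pvRankClosed kv.1)) (by omega), pv_cform_cons]
    omega

lemma pv_any_swap (ws : List String) (doc : List (String × String)) :
    ws.any (pvMemDoc doc) = doc.any (fun kv => decide (kv.1 ∈ ws)) := by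
  rw [Bool.eq_iff_iff]
  simp only [List.any_eq_true, pvMemDoc, List.any_eq_true, beq_iff_eq, decide_eq_true_eq]
  constructor
  · rintro ⟨f, hf, kv, hkv, he⟩; exact ⟨kv, hkv, he ▸ hf⟩
  · rintro ⟨kv, hkv, hm⟩; exact ⟨kv.1, hm, kv, hkv, rfl⟩

-- ===== VERDICT (by name: the statement is the Claim_ definition above) =====
theorem calculate_sensitivity_level_py_spec : Claim_equal_calculate_sensitivity_level_py := by
  intro doc _
  unfold Spec_calculate_sensitivity_level_py calculate_sensitivity_level_py
  unfold calculate_sensitivity_level_py_alt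
  simp only [pv_rank_eq, pv_fold_eq doc 3 (le_refl 3), pvSensitiveFields, pvLoopA, pv_any_swap]
  have e1 : ["ssn", "credit_card", "salary", "medical_info"] = pvHw := rfl
  have e2 : ["email", "phone", "address", "birth_date"] = pvMw := rfl
  have e3 : ["name", "grade", "subject"] = pvLw := rfl
  simp only [e1, e2, e3, pvCform]
  by_cases h1 : doc.any (fun kv => decide (kv.1 ∈ pvHw)) <;>
    by_cases h2 : doc.any (fun kv => decide (kv.1 ∈ pvMw)) <;>
    by_cases h3 : doc.any (fun kv => decide (kv.1 ∈ pvLw)) <;>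
      simp [h1, h2, h3]
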